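-- pv_equiv track=rewrite | github.com/Diabel404/Pulse | Pulse_Video/video_energy.py | detect_low_activity
-- ===== SOURCE A (Python) =====
-- def detect_low_activity(data, threshold=8, min_duration=120):
--     low_periods = []
--     start = None
--
--     for point in data:
--         if point["energy"] < threshold:
--             if start is None:
--                 start = point["second"]
--         else:
--             if start is not None:
--                 duration = point["second"] - start
--                 if duration >= min_duration:
--                     low_periods.append((start, point["second"]))
--                 start = None
--
--     if start is not None:
--         duration = data[-1]["second"] - start
--         if duration >= min_duration:
--             low_periods.append((start, data[-1]["second"]))
--
--     return low_periods
-- ===== SOURCE B (Python) =====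
-- def detect_low_activity(data, threshold=8, min_duration=120):
--     # Two-stage group-by: first materialize the maximal runs of equal
--     # low/high classification, then emit one period per low run.
--     groups = []
--     for point in data:
--         flag = point["energy"] < threshold
--         if groups and groups[-1][0] == flag:
--             groups[-1][1].append(point)
--         else:
--             groups.append((flag, [point]))
--
--     low_periods = []
--     nexts = groups[1:] + [None]
--     for (flag, grp), nxt in zip(groups, nexts):
--         if flag:
--             start = grp[0]["second"]
--             # interior run ends at the breaking high point (= next run's first
--             # point); a trailing run ends at its own last point.
--             end = nxt[1][0]["second"] if nxt is not None else grp[-1]["second"]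
--             if end - start >= min_duration:
--                 low_periods.append((start, end))
--     return low_periods
-- ===== Notes on version B (the rewrite author's own statement) =====
-- stated objective: alternative
-- what changed: Replaces A's one-pass state machine (Optional 'start' threaded through every point plus a post-loop trailing-run fixup) by a two-stage group-by: stage 1 materializes the list of maximal runs of equal low/high classification, stage 2 zips each run with its successor and emits a period per low run (next run's first second, or the run's own last second for a trailing run).
import Mathlib
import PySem

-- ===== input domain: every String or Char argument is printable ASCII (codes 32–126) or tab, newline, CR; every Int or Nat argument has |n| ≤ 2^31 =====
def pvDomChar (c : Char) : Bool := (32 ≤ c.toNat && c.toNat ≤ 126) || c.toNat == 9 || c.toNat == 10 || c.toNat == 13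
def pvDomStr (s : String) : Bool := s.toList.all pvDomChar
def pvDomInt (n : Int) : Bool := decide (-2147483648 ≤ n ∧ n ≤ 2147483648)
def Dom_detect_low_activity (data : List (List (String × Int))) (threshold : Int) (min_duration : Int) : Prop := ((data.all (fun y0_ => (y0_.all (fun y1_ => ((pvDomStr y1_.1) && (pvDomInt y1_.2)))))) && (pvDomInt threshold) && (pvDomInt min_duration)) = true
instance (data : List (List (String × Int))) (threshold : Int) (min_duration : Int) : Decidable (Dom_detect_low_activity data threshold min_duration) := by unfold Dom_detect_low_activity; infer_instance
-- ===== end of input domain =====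

-- B replaces A's one-pass Optional-start state machine by a two-stage group-by
-- (materialize maximal low/high runs, then emit a period per low run); same cost.

-- point["energy"] / point["second"]; Pre_ guarantees the key is present wherever the
-- Python reads it, so the .getD 0 default is never the value used on admitted inputs.
def pvGetE (p : List (String × Int)) : Int := ((PySem.Dict.ofList p).get? "energy").getD 0
def pvGetS (p : List (String × Int)) : Int := ((PySem.Dict.ofList p).get? "second").getD 0

-- ===== PORT A =====
-- loop body of A: state = (low_periods, start)
def pvStepA (threshold min_duration : Int) (st : List (Int × Int) × Option Int)
    (point : List (String × Int)) : List (Int × Int) × Option Int :=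
  if pvGetE point < threshold then
    match st.2 with
    | none => (st.1, some (pvGetS point))
    | some _ => st
  else
    match st.2 with
    | none => st
    | some s =>
        (if pvGetS point - s ≥ min_duration then st.1 ++ [(s, pvGetS point)] else st.1, none)

def detect_low_activity (data : List (List (String × Int))) (threshold : Int) (min_duration : Int) : List (Int × Int) :=
  let st := data.foldl (pvStepA threshold min_duration) ([], none)
  match st.2 with
  | none => st.1
  | some s =>
      -- data[-1]; start ≠ None forces data nonempty, so the .getD [] default is never used
      let lastp := (PySem.List.pyGet? data (-1)).getD []
      if pvGetS lastp - s ≥ min_duration then st.1 ++ [(s, pvGetS lastp)] else st.1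

-- ===== PORT B =====
-- stage-1 loop body: append the point to the last group or start a new group
def pvStepG (threshold : Int) (groups : List (Bool × List (List (String × Int))))
    (point : List (String × Int)) : List (Bool × List (List (String × Int))) :=
  let flag := decide (pvGetE point < threshold)
  match groups.getLast? with
  | some last =>
      if last.1 = flag then groups.dropLast ++ [(flag, last.2 ++ [point])]
      else groups ++ [(flag, [point])]
  | none => groups ++ [(flag, [point])]

-- stage-2 loop body over zip(groups, nexts); grp[0]/grp[-1]/nxt[1][0]: groups are
-- nonempty by construction, so the .headD/.getLastD defaults are never the value used
def pvStepE (min_duration : Int) (acc : List (Int × Int))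
    (x : (Bool × List (List (String × Int))) × Option (Bool × List (List (String × Int)))) :
    List (Int × Int) :=
  if x.1.1 then
    let start := pvGetS (x.1.2.headD [])
    let endv := match x.2 with
      | some nxt => pvGetS (nxt.2.headD [])
      | none => pvGetS (x.1.2.getLastD [])
    if endv - start ≥ min_duration then acc ++ [(start, endv)] else acc
  else acc

def detect_low_activity_alt (data : List (List (String × Int))) (threshold : Int) (min_duration : Int) : List (Int × Int) :=
  let groups := data.foldl (pvStepG threshold) []
  let nexts := (groups.drop 1).map some ++ [none]
  (groups.zip nexts).foldl (pvStepE min_duration) []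

-- ===== PRECONDITION & SPEC =====
def pvHasKey (k : String) (p : List (String × Int)) : Bool :=
  ((PySem.Dict.ofList p).get? k).isSome

-- Pre_ = exactly the inputs on which the Python A returns (raises no KeyError): every point's
-- "energy" is read; "second" is read at the first point if low, at every point whose lowness
-- differs from its predecessor's (run starts and run breaks), and at the last point if low.
def Pre_detect_low_activity (data : List (List (String × Int))) (threshold : Int) (min_duration : Int) : Prop :=
  (∀ p ∈ data, pvHasKey "energy" p = true) ∧
  (∀ p ∈ data.head?.toList, pvGetE p < threshold → pvHasKey "second" p = true) ∧
  (∀ pq ∈ data.zip (data.drop 1),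
      ¬(pvGetE pq.1 < threshold ↔ pvGetE pq.2 < threshold) → pvHasKey "second" pq.2 = true) ∧
  (∀ p ∈ data.getLast?.toList, pvGetE p < threshold → pvHasKey "second" p = true)

instance (data : List (List (String × Int))) (threshold : Int) (min_duration : Int) : Decidable (Pre_detect_low_activity data threshold min_duration) := by unfold Pre_detect_low_activity; infer_instance

def pvWitness_detect_low_activity : (List (List (String × Int))) × Int × Int :=
  ([[("energy", 1), ("second", 0)], [("energy", 9), ("second", 200)]], 8, 120)

def Spec_detect_low_activity (data : List (List (String × Int))) (threshold : Int) (min_duration : Int) (out : List (Int × Int)) : Prop := out = detect_low_activity_alt data threshold min_duration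
instance (data : List (List (String × Int))) (threshold : Int) (min_duration : Int) (out : List (Int × Int)) : Decidable (Spec_detect_low_activity data threshold min_duration out) := by unfold Spec_detect_low_activity; infer_instance

-- ===== CLAIM (what is proved, stated in full; the proofs are below) =====
def Claim_equal_detect_low_activity : Prop := ∀ (data : List (List (String × Int))) (threshold : Int) (min_duration : Int), Dom_detect_low_activity data threshold min_duration → Pre_detect_low_activity data threshold min_duration → Spec_detect_low_activity data threshold min_duration (detect_low_activity data threshold min_duration)

-- ===== LEMMAS AND PROOFS =====

-- proof-side intermediate program: run-based recursion (neither port)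
def pvSkipLow (threshold : Int) (last : List (String × Int)) :
    List (List (String × Int)) → (List (String × Int)) × List (List (String × Int))
  | [] => (last, [])
  | p :: rs => if pvGetE p < threshold then pvSkipLow threshold p rs else (last, p :: rs)

theorem pvSkipLow_len (threshold : Int) (last : List (String × Int))
    (l : List (List (String × Int))) : (pvSkipLow threshold last l).2.length ≤ l.length := by
  induction l generalizing last with
  | nil => simp [pvSkipLow]
  | cons p rs ih =>
      simp only [pvSkipLow]
      split
      · exact le_trans (ih p) (Nat.le_succ _)
      · simp

def pvGoB (threshold min_duration : Int) : List (List (String × Int)) → List (Int × Int)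
  | [] => []
  | p :: rs =>
    if pvGetE p < threshold then
      let pr := pvSkipLow threshold p rs
      let endv := match pr.2 with
        | [] => pvGetS pr.1
        | q :: _ => pvGetS q
      (if endv - pvGetS p ≥ min_duration then [(pvGetS p, endv)] else []) ++
        pvGoB threshold min_duration pr.2
    else pvGoB threshold min_duration rs
termination_by l => l.length
decreasing_by
  · exact Nat.lt_succ_of_le (pvSkipLow_len threshold p rs)
  · simp

-- A's after-the-loop fixup, with the "last point" as a parameter
def pvCloseA (threshold min_duration : Int) (lp : List (String × Int))
    (st : List (Int × Int) × Option Int) : List (Int × Int) :=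
  match st.2 with
  | none => st.1
  | some s => if pvGetS lp - s ≥ min_duration then st.1 ++ [(s, pvGetS lp)] else st.1

-- end value the run-based recursion assigns to the run pvSkipLow just closed
def pvEndOf (threshold : Int) (last0 : List (String × Int))
    (l : List (List (String × Int))) : Int :=
  match (pvSkipLow threshold last0 l).2 with
  | [] => pvGetS (pvSkipLow threshold last0 l).1
  | q :: _ => pvGetS q

-- A = pvGoB: the two loop invariants, by simultaneous strong induction on the suffix length
theorem pvKey (threshold min_duration : Int) :
    ∀ n (l : List (List (String × Int))), l.length ≤ n →
      (∀ acc lp,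
        pvCloseA threshold min_duration (l.getLastD lp)
            (l.foldl (pvStepA threshold min_duration) (acc, none))
          = acc ++ pvGoB threshold min_duration l) ∧
      (∀ (acc : List (Int × Int)) (s : Int) last0,
        pvCloseA threshold min_duration (l.getLastD last0)
            (l.foldl (pvStepA threshold min_duration) (acc, some s))
          = (if pvEndOf threshold last0 l - s ≥ min_duration
              then acc ++ [(s, pvEndOf threshold last0 l)] else acc)
            ++ pvGoB threshold min_duration (pvSkipLow threshold last0 l).2) := by
  intro n
  induction n with
  | zero =>
      intro l hl
      have : l = [] := List.eq_nil_of_length_eq_zero (Nat.le_zero.mp hl)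
      subst this
      constructor
      · intro acc lp; simp [pvCloseA, pvGoB]
      · intro acc s last0
        simp [pvCloseA, pvGoB, pvEndOf, pvSkipLow]
  | succ n ih =>
      intro l hl
      cases l with
      | nil =>
          constructor
          · intro acc lp; simp [pvCloseA, pvGoB]
          · intro acc s last0
            simp [pvCloseA, pvGoB, pvEndOf, pvSkipLow]
      | cons p rs =>
          have hrs : rs.length ≤ n := Nat.le_of_succ_le_succ hl
          constructor
          · intro acc lp
            by_cases hlow : pvGetE p < threshold
            · -- a run starts at p
              rw [List.foldl_cons]
              have : pvStepA threshold min_duration (acc, none) p = (acc, some (pvGetS p)) := by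
                simp [pvStepA, hlow]
              rw [this, List.getLastD_cons, (ih rs hrs).2 acc (pvGetS p) p]
              have hgo : pvGoB threshold min_duration (p :: rs) =
                  (if pvEndOf threshold p rs - pvGetS p ≥ min_duration
                    then [(pvGetS p, pvEndOf threshold p rs)] else [])
                  ++ pvGoB threshold min_duration (pvSkipLow threshold p rs).2 := by
                rw [pvGoB, if_pos hlow]
                rfl
              rw [hgo]
              split_ifs <;> simp
            · -- p is high, nothing happens
              rw [List.foldl_cons]
              have : pvStepA threshold min_duration (acc, none) p = (acc, none) := by
                simp [pvStepA, hlow]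
              rw [this, List.getLastD_cons, (ih rs hrs).1 acc p]
              rw [pvGoB]
              simp only [hlow, if_false]
          · intro acc s last0
            by_cases hlow : pvGetE p < threshold
            · -- the run continues through p
              rw [List.foldl_cons]
              have : pvStepA threshold min_duration (acc, some s) p = (acc, some s) := by
                simp [pvStepA, hlow]
              rw [this, List.getLastD_cons, (ih rs hrs).2 acc s p]
              have hskip : pvSkipLow threshold last0 (p :: rs) = pvSkipLow threshold p rs := by
                simp [pvSkipLow, hlow]
              have hend : pvEndOf threshold last0 (p :: rs) = pvEndOf threshold p rs := by
                simp [pvEndOf, hskip]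
              rw [hskip, hend]
            · -- p breaks the run
              rw [List.foldl_cons]
              have hstep : pvStepA threshold min_duration (acc, some s) p
                  = (if pvGetS p - s ≥ min_duration then acc ++ [(s, pvGetS p)] else acc, none) := by
                simp [pvStepA, hlow]
              have hskip : pvSkipLow threshold last0 (p :: rs) = (last0, p :: rs) := by
                simp [pvSkipLow, hlow]
              have hend : pvEndOf threshold last0 (p :: rs) = pvGetS p := by
                simp [pvEndOf, hskip]
              rw [hstep, List.getLastD_cons, (ih rs hrs).1 _ p, hskip, hend]
              have hgo : pvGoB threshold min_duration (p :: rs) = pvGoB threshold min_duration rs := by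
                rw [pvGoB]; simp [hlow]
              rw [hgo]

-- A's wrapper equals pvCloseA with the actual last element (for nonempty data)
theorem pvA_eq_close (data : List (List (String × Int))) (threshold min_duration : Int) :
    detect_low_activity data threshold min_duration
      = pvCloseA threshold min_duration (data.getLastD [])
          (data.foldl (pvStepA threshold min_duration) ([], none)) := by
  unfold detect_low_activity pvCloseA
  cases hst : (data.foldl (pvStepA threshold min_duration) ([], none)).2 with
  | none => simp [hst]
  | some s =>
      simp [hst, PySem.List.pyGet?_neg_one, List.getLastD_eq_getLast?]

theorem pvA_eq_goB (data : List (List (String × Int))) (threshold min_duration : Int) :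
    detect_low_activity data threshold min_duration = pvGoB threshold min_duration data := by
  rw [pvA_eq_close data threshold min_duration]
  exact ((pvKey threshold min_duration data.length data le_rfl).1 [] []).trans (by simp)

-- take the maximal prefix of points whose lowness equals f, and the rest
def pvTakeRun (threshold : Int) (f : Bool) :
    List (List (String × Int)) → List (List (String × Int)) × List (List (String × Int))
  | [] => ([], [])
  | q :: rs =>
      if decide (pvGetE q < threshold) = f then
        ((q :: (pvTakeRun threshold f rs).1), (pvTakeRun threshold f rs).2)
      else ([], q :: rs)

theorem pvTakeRun_len (threshold : Int) (f : Bool) (l : List (List (String × Int))) :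
    (pvTakeRun threshold f l).2.length ≤ l.length := by
  induction l with
  | nil => simp [pvTakeRun]
  | cons q rs ih =>
      simp only [pvTakeRun]
      split
      · exact le_trans ih (Nat.le_succ _)
      · simp

-- recursive (front-to-back) grouping: the specification of stage 1
def pvGrF (threshold : Int) : List (List (String × Int)) → List (Bool × List (List (String × Int)))
  | [] => []
  | p :: rs =>
      (decide (pvGetE p < threshold),
        p :: (pvTakeRun threshold (decide (pvGetE p < threshold)) rs).1)
      :: pvGrF threshold (pvTakeRun threshold (decide (pvGetE p < threshold)) rs).2
termination_by l => l.length
decreasing_by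
  exact Nat.lt_succ_of_le (pvTakeRun_len threshold _ rs)

-- end value of a low group: the next group's first second, or its own last second
def pvNextEnd (g : Bool × List (List (String × Int)))
    (rest : List (Bool × List (List (String × Int)))) : Int :=
  match rest with
  | r :: _ => pvGetS (r.2.headD [])
  | [] => pvGetS (g.2.getLastD [])

-- recursive emission: the specification of stage 2
def pvEmit (min_duration : Int) : List (Bool × List (List (String × Int))) → List (Int × Int)
  | [] => []
  | g :: rest =>
      (if g.1 then
        if pvNextEnd g rest - pvGetS (g.2.headD []) ≥ min_duration
        then [(pvGetS (g.2.headD []), pvNextEnd g rest)] else []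
      else []) ++ pvEmit min_duration rest

-- stage 1 (the foldl) computes pvGrF: invariant with an open last group
theorem pvStage1_inv (threshold : Int) :
    ∀ (l : List (List (String × Int))) (pre : List (Bool × List (List (String × Int))))
      (f : Bool) (grp : List (List (String × Int))),
      l.foldl (pvStepG threshold) (pre ++ [(f, grp)])
        = pre ++ [(f, grp ++ (pvTakeRun threshold f l).1)]
            ++ pvGrF threshold (pvTakeRun threshold f l).2 := by
  intro l
  induction l with
  | nil => intro pre f grp; simp [pvTakeRun, pvGrF]
  | cons q rs ih =>
      intro pre f grp
      by_cases hq : decide (pvGetE q < threshold) = f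
      · rw [List.foldl_cons]
        have hstep : pvStepG threshold (pre ++ [(f, grp)]) q = pre ++ [(f, grp ++ [q])] := by
          simp [pvStepG, hq]
        rw [hstep, ih pre f (grp ++ [q])]
        simp [pvTakeRun, hq]
      · rw [List.foldl_cons]
        have hstep : pvStepG threshold (pre ++ [(f, grp)]) q
            = (pre ++ [(f, grp)]) ++ [(decide (pvGetE q < threshold), [q])] := by
          simp only [pvStepG]
          rw [List.getLast?_concat]
          simp [hq]
          exact fun h => hq h.symm
        rw [hstep, ih (pre ++ [(f, grp)]) _ [q]]
        have htr : pvTakeRun threshold f (q :: rs) = ([], q :: rs) := by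
          simp [pvTakeRun, hq]
        rw [htr]
        have hgr : pvGrF threshold (q :: rs)
            = (decide (pvGetE q < threshold),
                q :: (pvTakeRun threshold (decide (pvGetE q < threshold)) rs).1)
              :: pvGrF threshold (pvTakeRun threshold (decide (pvGetE q < threshold)) rs).2 := by
          rw [pvGrF]
        rw [hgr]; simp

theorem pvStage1_eq (threshold : Int) (data : List (List (String × Int))) :
    data.foldl (pvStepG threshold) [] = pvGrF threshold data := by
  cases data with
  | nil => simp [pvGrF]
  | cons p rs =>
      rw [List.foldl_cons]
      have hstep : pvStepG threshold [] p = [(decide (pvGetE p < threshold), [p])] := by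
        simp [pvStepG]
      rw [hstep]
      have := pvStage1_inv threshold rs [] (decide (pvGetE p < threshold)) [p]
      simp only [List.nil_append] at this
      rw [this, pvGrF]
      simp

-- stage 2 (the foldl over the zip) computes pvEmit
theorem pvStage2_eq (min_duration : Int) :
    ∀ (gs : List (Bool × List (List (String × Int)))) (acc : List (Int × Int)),
      (gs.zip ((gs.drop 1).map some ++ [none])).foldl (pvStepE min_duration) acc
        = acc ++ pvEmit min_duration gs := by
  intro gs
  induction gs with
  | nil => intro acc; simp [pvEmit]
  | cons g rest ih =>
      intro acc
      cases rest with
      | nil =>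
          simp only [List.drop_succ_cons, List.drop_zero, List.map_nil, List.nil_append,
            List.zip_cons_cons, List.zip_nil_right, List.foldl_cons, List.foldl_nil]
          cases g with
          | mk f grp =>
              by_cases hf : f
              · subst hf
                simp only [pvStepE, pvEmit, pvNextEnd, if_true]
                split_ifs <;> simp_all
              · simp [pvStepE, pvEmit, hf]
      | cons r rest' =>
          have hzip : ((g :: r :: rest').zip (((g :: r :: rest').drop 1).map some ++ [none]))
              = (g, some r) :: ((r :: rest').zip (((r :: rest').drop 1).map some ++ [none])) := by
            simp
          rw [hzip, List.foldl_cons, ih]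
          cases g with
          | mk f grp =>
              by_cases hf : f
              · subst hf
                simp only [pvStepE, pvEmit, pvNextEnd, if_true]
                split_ifs <;> simp_all
              · simp [pvStepE, pvEmit, hf]

-- pvSkipLow in terms of pvTakeRun (on an all-low prefix)
theorem pvSkip_eq_take (threshold : Int) :
    ∀ (l : List (List (String × Int))) (last0 : List (String × Int)),
      pvSkipLow threshold last0 l
        = ((pvTakeRun threshold true l).1.getLastD last0, (pvTakeRun threshold true l).2) := by
  intro l
  induction l with
  | nil => intro last0; simp [pvSkipLow, pvTakeRun]
  | cons q rs ih =>
      intro last0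
      by_cases hq : pvGetE q < threshold
      · have hs : pvSkipLow threshold last0 (q :: rs) = pvSkipLow threshold q rs := by
          simp [pvSkipLow, hq]
        have ht : pvTakeRun threshold true (q :: rs)
            = (q :: (pvTakeRun threshold true rs).1, (pvTakeRun threshold true rs).2) := by
          simp [pvTakeRun, hq]
        rw [hs, ih q, ht, List.getLastD_cons]
      · simp [pvSkipLow, pvTakeRun, hq]

-- skipping an all-high prefix does not change pvGoB
theorem pvGoB_drop_high (threshold min_duration : Int) :
    ∀ (run rest : List (List (String × Int))),
      (∀ q ∈ run, ¬ pvGetE q < threshold) →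
      pvGoB threshold min_duration (run ++ rest) = pvGoB threshold min_duration rest := by
  intro run
  induction run with
  | nil => intro rest _; simp
  | cons q rs ih =>
      intro rest hall
      have hq : ¬ pvGetE q < threshold := hall q (by simp)
      rw [List.cons_append, pvGoB]
      simp only [hq, if_false]
      exact ih rest (fun x hx => hall x (by simp [hx]))

theorem pvTakeRun_all (threshold : Int) (f : Bool) (l : List (List (String × Int))) :
    ∀ q ∈ (pvTakeRun threshold f l).1, decide (pvGetE q < threshold) = f := by
  induction l with
  | nil => simp [pvTakeRun]
  | cons p rs ih =>
      simp only [pvTakeRun]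
      split
      · intro q hq
        rcases List.mem_cons.mp hq with h | h
        · subst h; assumption
        · exact ih q h
      · simp

theorem pvTakeRun_append (threshold : Int) (f : Bool) (l : List (List (String × Int))) :
    (pvTakeRun threshold f l).1 ++ (pvTakeRun threshold f l).2 = l := by
  induction l with
  | nil => simp [pvTakeRun]
  | cons p rs ih =>
      simp only [pvTakeRun]
      split
      · simp [ih]
      · simp

-- the run-based recursion computes pvEmit of the grouping
theorem pvGoB_eq_emit (threshold min_duration : Int) :
    ∀ n (l : List (List (String × Int))), l.length ≤ n →
      pvGoB threshold min_duration l = pvEmit min_duration (pvGrF threshold l) := by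
  intro n
  induction n with
  | zero =>
      intro l hl
      have : l = [] := List.eq_nil_of_length_eq_zero (Nat.le_zero.mp hl)
      subst this; simp [pvGoB, pvGrF, pvEmit]
  | succ n ih =>
      intro l hl
      cases l with
      | nil => simp [pvGoB, pvGrF, pvEmit]
      | cons p rs =>
          have hrs : rs.length ≤ n := Nat.le_of_succ_le_succ hl
          by_cases hlow : pvGetE p < threshold
          · -- low group starting at p
            have hflag : decide (pvGetE p < threshold) = true := by simp [hlow]
            have hgr : pvGrF threshold (p :: rs)
                = (true, p :: (pvTakeRun threshold true rs).1)
                  :: pvGrF threshold (pvTakeRun threshold true rs).2 := by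
              rw [pvGrF, hflag]
            have hskip := pvSkip_eq_take threshold rs p
            have hrest : (pvTakeRun threshold true rs).2.length ≤ n :=
              le_trans (pvTakeRun_len threshold true rs) hrs
            rw [pvGoB]
            simp only [hlow, if_true]
            rw [hgr, pvEmit]
            simp only [if_true]
            rw [hskip]
            have hrec := ih (pvTakeRun threshold true rs).2 hrest
            cases hR : (pvTakeRun threshold true rs).2 with
            | nil =>
                simp only [hR] at hrec ⊢
                have hnil : pvGrF threshold ([] : List (List (String × Int))) = [] := by
                  simp [pvGrF]
                rw [hrec, hnil]
                simp only [pvNextEnd, List.getLastD_cons]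
                simp
            | cons q rest' =>
                simp only [hR] at hrec ⊢
                have hgrq : pvGrF threshold (q :: rest')
                    = (decide (pvGetE q < threshold),
                        q :: (pvTakeRun threshold (decide (pvGetE q < threshold)) rest').1)
                      :: pvGrF threshold (pvTakeRun threshold (decide (pvGetE q < threshold)) rest').2 := by
                  rw [pvGrF]
                rw [hrec, hgrq]
                simp [pvNextEnd]
          · -- high group starting at p
            have hflag : decide (pvGetE p < threshold) = false := by simp [hlow]
            have hgr : pvGrF threshold (p :: rs)
                = (false, p :: (pvTakeRun threshold false rs).1)
                  :: pvGrF threshold (pvTakeRun threshold false rs).2 := by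
              rw [pvGrF, hflag]
            rw [pvGoB]
            simp only [hlow, if_false]
            rw [hgr, pvEmit]
            simp only [Bool.false_eq_true, if_false, List.nil_append]
            have hsplit := pvTakeRun_append threshold false rs
            have hall : ∀ q ∈ (pvTakeRun threshold false rs).1, ¬ pvGetE q < threshold := by
              intro q hq
              have := pvTakeRun_all threshold false rs q hq
              simpa using this
            have hrest : (pvTakeRun threshold false rs).2.length ≤ n :=
              le_trans (pvTakeRun_len threshold false rs) hrs
            calc pvGoB threshold min_duration rs
                = pvGoB threshold min_duration
                    ((pvTakeRun threshold false rs).1 ++ (pvTakeRun threshold false rs).2) := by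
                  rw [hsplit]
              _ = pvGoB threshold min_duration (pvTakeRun threshold false rs).2 :=
                  pvGoB_drop_high threshold min_duration _ _ hall
              _ = pvEmit min_duration (pvGrF threshold (pvTakeRun threshold false rs).2) :=
                  ih _ hrest

-- ===== VERDICT (by name: the statement is the Claim_ definition above) =====
theorem detect_low_activity_spec : Claim_equal_detect_low_activity := by
  intro data threshold min_duration _dom _pre
  unfold Spec_detect_low_activity
  rw [pvA_eq_goB data threshold min_duration,
    pvGoB_eq_emit threshold min_duration data.length data le_rfl]
  unfold detect_low_activity_alt
  rw [pvStage1_eq threshold data, pvStage2_eq min_duration (pvGrF threshold data) []]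
  simp
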